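-- pv_equiv track=rewrite | github.com/shehadehmohammad099-create/lexikon-backend | server.py | build_podcast_source_text
-- ===== SOURCE A (Python) =====
-- from typing import Optional, List, Dict, Any
--
-- MAX_PODCAST_SOURCE_CHARS = 30000
--
-- def build_podcast_source_text(sections: List[dict]) -> str:
--     """Build a capped source text from section payloads."""
--     total = 0
--     parts = []
--     for sec in sections or []:
--         label = sec.get("label") or sec.get("id") or ""
--         text = sec.get("text") or ""
--         if not text:
--             continue
--         block = f"[{label}]\n{text}\n\n"
--         if total + len(block) > MAX_PODCAST_SOURCE_CHARS:
--             remaining = MAX_PODCAST_SOURCE_CHARS - total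
--             if remaining > 0:
--                 parts.append(block[:remaining])
--             break
--         parts.append(block)
--         total += len(block)
--     return "".join(parts).strip()
-- ===== SOURCE B (Python) =====
-- from typing import Optional, List, Dict, Any
--
-- MAX_PODCAST_SOURCE_CHARS = 30000
--
-- def build_podcast_source_text(sections: List[dict]) -> str:
--     """Build a capped source text from section payloads."""
--     parts = [
--         "[{}]\n{}\n\n".format(sec.get("label") or sec.get("id") or "", sec.get("text"))
--         for sec in (sections or [])
--         if sec.get("text")
--     ]
--     return "".join(parts)[:MAX_PODCAST_SOURCE_CHARS].strip()
-- ===== Notes on version B (the rewrite author's own statement) =====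
-- stated objective: simpler
-- what changed: B drops A's running total, early break and partial-slice bookkeeping: it collects all non-empty blocks in one comprehension, joins them, and enforces the cap with a single slice [:MAX] of the joined text.
import Mathlib
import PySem

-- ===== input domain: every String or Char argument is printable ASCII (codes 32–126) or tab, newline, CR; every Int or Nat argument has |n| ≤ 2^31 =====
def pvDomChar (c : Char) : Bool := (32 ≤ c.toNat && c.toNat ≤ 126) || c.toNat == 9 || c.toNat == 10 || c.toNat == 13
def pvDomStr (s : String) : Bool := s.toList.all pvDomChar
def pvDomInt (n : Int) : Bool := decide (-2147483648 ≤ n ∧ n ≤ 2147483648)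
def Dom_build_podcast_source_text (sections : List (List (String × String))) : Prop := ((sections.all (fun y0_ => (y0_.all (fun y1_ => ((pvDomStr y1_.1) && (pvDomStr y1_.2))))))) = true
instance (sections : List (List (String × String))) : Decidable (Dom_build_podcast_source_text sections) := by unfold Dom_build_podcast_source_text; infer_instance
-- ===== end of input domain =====

-- B replaces A's running total / early break / partial-slice cap with one comprehension
-- of blocks followed by a single slice [:MAX] of the joined text (objective: simpler).

-- shared helpers: both Pythons evaluate the very same expressions
-- `sec.get(k)`  (dict lookup, None when absent)
def pvGet (sec : List (String × String)) (k : String) : Option String :=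
  (PySem.Dict.mk sec).get? k

-- Python truthiness fallback `x or y` for x an optional string: y when x is None or ""
def pvTruthyOr (x : Option String) (y : List Char) : List Char :=
  match x with
  | some s => if s.toList = [] then y else s.toList
  | none => y

-- `sec.get("label") or sec.get("id") or ""`
def pvLabel (sec : List (String × String)) : List Char :=
  pvTruthyOr (pvGet sec "label") (pvTruthyOr (pvGet sec "id") [])

-- f"[{label}]\n{text}\n\n"
def pvBlock (sec : List (String × String)) (text : List Char) : List Char :=
  ['['] ++ pvLabel sec ++ [']', '\n'] ++ text ++ ['\n', '\n']

-- ===== PORT A =====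
-- A's loop: running total, append full blocks, truncate the overflowing block and break
def pvLoopA : List (List (String × String)) → Nat → List (List Char)
  | [], _ => []
  | sec :: rest, total =>
    let text := pvTruthyOr (pvGet sec "text") []
    if text = [] then pvLoopA rest total
    else
      let block := pvBlock sec text
      if 30000 < total + block.length then
        let remaining : Int := 30000 - (total : Int)
        if 0 < remaining then [PySem.List.slice block none (some remaining)] else []
      else block :: pvLoopA rest (total + block.length)

def build_podcast_source_text (sections : List (List (String × String))) : String :=
  String.ofList (PySem.Chars.strip (PySem.Chars.join [] (pvLoopA sections 0)))

-- ===== PORT B =====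
-- the comprehension's body/filter: the block when sec.get("text") is truthy, else skipped
def pvBlockOf? (sec : List (String × String)) : Option (List Char) :=
  let text := pvTruthyOr (pvGet sec "text") []
  if text = [] then none else some (pvBlock sec text)

def build_podcast_source_text_alt (sections : List (List (String × String))) : String :=
  let parts := sections.filterMap pvBlockOf?
  String.ofList (PySem.Chars.strip (PySem.List.slice (PySem.Chars.join [] parts) none (some 30000)))

-- ===== PRECONDITION & SPEC =====
def Spec_build_podcast_source_text (sections : List (List (String × String))) (out : String) : Prop := out = build_podcast_source_text_alt sections
instance (sections : List (List (String × String))) (out : String) : Decidable (Spec_build_podcast_source_text sections out) := by unfold Spec_build_podcast_source_text; infer_instance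

-- ===== CLAIM (what is proved, stated in full; the proofs are below) =====
def Claim_equal_build_podcast_source_text : Prop := ∀ (sections : List (List (String × String))), Dom_build_podcast_source_text sections → Spec_build_podcast_source_text sections (build_podcast_source_text sections)

-- ===== LEMMAS AND PROOFS =====

-- "".join over List Char is flatten
theorem pv_join_nil_eq_flatten (parts : List (List Char)) :
    PySem.Chars.join [] parts = parts.flatten := by
  induction parts with
  | nil => rfl
  | cons p ps ih =>
    cases ps with
    | nil => simp [PySem.Chars.join, List.intercalate]
    | cons q qs => rw [PySem.Chars.join_cons_cons]; simp_all [List.flatten]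

-- A's capped loop produces exactly the first (30000 - total) chars of the full concatenation
theorem pvLoopA_flatten (secs : List (List (String × String))) :
    ∀ total : Nat, total ≤ 30000 →
      (pvLoopA secs total).flatten
        = ((secs.filterMap pvBlockOf?).flatten).take (30000 - total) := by
  induction secs with
  | nil => intro total _; simp [pvLoopA]
  | cons sec rest ih =>
    intro total htot
    by_cases htext : pvTruthyOr (pvGet sec "text") [] = []
    · have hb : pvBlockOf? sec = none := by simp [pvBlockOf?, htext]
      simp only [pvLoopA, htext, List.filterMap_cons, hb]
      exact ih total htot
    · have hb : pvBlockOf? sec = some (pvBlock sec (pvTruthyOr (pvGet sec "text") [])) := by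
        simp [pvBlockOf?, htext]
      set block := pvBlock sec (pvTruthyOr (pvGet sec "text") []) with hblock
      simp only [pvLoopA, htext, List.filterMap_cons, hb, List.flatten_cons]
      by_cases hcap : 30000 < total + block.length
      · rw [if_pos hcap]
        by_cases hrem : (0 : Int) < 30000 - (total : Int)
        · rw [if_pos hrem]
          rw [PySem.List.slice_to block (by omega)]
          have hto : ((30000 : Int) - (total : Int)).toNat = 30000 - total := by omega
          rw [hto, List.take_append_of_le_length (by omega)]
          simp
        · have hteq : total = 30000 := by omega
          rw [if_neg hrem]
          simp [hteq]
      · rw [if_neg hcap, if_neg not_false, List.flatten_cons, ← hblock]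
        rw [ih (total + block.length) (by omega)]
        rw [List.take_append, List.take_of_length_le (show block.length ≤ 30000 - total by omega)]
        have harith : 30000 - (total + block.length) = 30000 - total - block.length := by omega
        rw [harith]

-- ===== VERDICT (by name: the statement is the Claim_ definition above) =====
theorem build_podcast_source_text_spec : Claim_equal_build_podcast_source_text := by
  intro sections _
  show _ = _
  unfold build_podcast_source_text build_podcast_source_text_alt
  show String.ofList (PySem.Chars.strip (PySem.Chars.join [] (pvLoopA sections 0)))
      = String.ofList (PySem.Chars.strip (PySem.List.slice
          (PySem.Chars.join [] (sections.filterMap pvBlockOf?)) none (some 30000)))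
  rw [pv_join_nil_eq_flatten, pv_join_nil_eq_flatten,
    pvLoopA_flatten sections 0 (by omega),
    PySem.List.slice_to _ (by norm_num)]
  rfl
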